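-- pv_equiv track=rewrite | github.com/serykhelena/sand_box | py_lin_prog/bundle_solver.py | get_bundle_vector
-- ===== SOURCE A (Python) =====
-- from collections import Counter
--
-- def get_bundle_vector(bundle, classes):
--     '''
--         Get vector with number of each item in specified bundle
--
--         Args:
--             bundle  [row-vector]    :   one bundle
--             classes [list]          :   item's names
--         Return:
--             [list if int]           : item's number in one bundle
--     '''
--
--     vector = []
--     for class_ in classes:
--         if class_ in bundle:
--             vector.append(Counter(bundle)[class_])
--         else:
--             vector.append(0)
--     return vector
-- ===== SOURCE B (Python) =====
-- def get_bundle_vector(bundle, classes):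
--     # Count bundle ONCE in a single pass, then map each class to its count.
--     counts = {}
--     for x in bundle:
--         counts[x] = counts.get(x, 0) + 1
--     return [counts.get(c, 0) for c in classes]
-- ===== Notes on version B (the rewrite author's own statement) =====
-- stated objective: faster
-- what changed: A loops over classes and for each class scans bundle for membership and rebuilds Counter(bundle) from scratch; B counts bundle once in a single pass into a dict and then maps each class to a O(1) lookup, so the per-class rescan of bundle disappears.
import Mathlib
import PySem

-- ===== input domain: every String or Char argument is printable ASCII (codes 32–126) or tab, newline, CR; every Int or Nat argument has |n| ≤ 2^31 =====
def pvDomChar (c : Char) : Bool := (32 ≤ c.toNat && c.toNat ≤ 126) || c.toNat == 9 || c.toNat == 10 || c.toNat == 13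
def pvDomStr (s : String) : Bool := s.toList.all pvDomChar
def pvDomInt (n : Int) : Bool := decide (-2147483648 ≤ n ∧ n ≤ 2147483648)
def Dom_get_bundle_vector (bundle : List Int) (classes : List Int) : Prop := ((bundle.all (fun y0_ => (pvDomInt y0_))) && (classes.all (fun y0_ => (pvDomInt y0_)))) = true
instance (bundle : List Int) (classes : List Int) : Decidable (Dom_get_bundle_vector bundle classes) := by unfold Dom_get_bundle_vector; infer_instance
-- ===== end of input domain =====

-- B counts bundle once into a dict and maps each class to a lookup, instead of A's per-class
-- membership scan of bundle plus a Counter(bundle) rebuilt from scratch for every class.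

-- ===== PORT A =====
-- for class_ in classes: vector.append(Counter(bundle)[class_]) if class_ in bundle else vector.append(0)
def get_bundle_vector (bundle : List Int) (classes : List Int) : List Int :=
  classes.foldl (fun vector class_ =>
    if class_ ∈ bundle then
      vector ++ [(PySem.Dict.counter bundle).getD class_ 0]
    else
      vector ++ [0]) []

-- ===== PORT B =====
-- counts[x] = counts.get(x, 0) + 1 over bundle, then [counts.get(c, 0) for c in classes]
def get_bundle_vector_alt (bundle : List Int) (classes : List Int) : List Int :=
  let counts : PySem.Dict Int Int :=
    bundle.foldl (fun d x => d.insert x (d.getD x 0 + 1)) PySem.Dict.empty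
  classes.map (fun c => counts.getD c 0)

-- ===== PRECONDITION & SPEC =====
def Spec_get_bundle_vector (bundle : List Int) (classes : List Int) (out : List Int) : Prop := out = get_bundle_vector_alt bundle classes
instance (bundle : List Int) (classes : List Int) (out : List Int) : Decidable (Spec_get_bundle_vector bundle classes out) := by unfold Spec_get_bundle_vector; infer_instance

-- ===== CLAIM (what is proved, stated in full; the proofs are below) =====
def Claim_equal_get_bundle_vector : Prop := ∀ (bundle : List Int) (classes : List Int), Dom_get_bundle_vector bundle classes → Spec_get_bundle_vector bundle classes (get_bundle_vector bundle classes)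

-- ===== LEMMAS AND PROOFS =====

-- A's fold equals a map of counts: Counter(bundle)[c] is bundle.count c, and 0 when c ∉ bundle.
lemma portA_eq_map_count (bundle classes : List Int) :
    get_bundle_vector bundle classes = classes.map (fun c => ((bundle.count c : Nat) : Int)) := by
  unfold get_bundle_vector
  have h : ∀ (v : List Int) (c : Int),
      (if c ∈ bundle then v ++ [(PySem.Dict.counter bundle).getD c 0] else v ++ [0])
      = v ++ [((bundle.count c : Nat) : Int)] := by
    intro v c
    by_cases hc : c ∈ bundle
    · simp [hc, PySem.Dict.getD_counter]
    · simp [hc, List.count_eq_zero.mpr hc]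
  simp only [h]
  exact PySem.List.foldl_append_singleton_eq_map _ _ _

lemma ports_agree (bundle classes : List Int) :
    get_bundle_vector bundle classes = get_bundle_vector_alt bundle classes := by
  rw [portA_eq_map_count]
  unfold get_bundle_vector_alt
  dsimp only
  refine List.map_congr_left fun c _ => ?_
  rw [PySem.Dict.getD_foldl_insert_add_one]
  simp

-- ===== VERDICT (by name: the statement is the Claim_ definition above) =====
theorem get_bundle_vector_spec : Claim_equal_get_bundle_vector := by
  intro bundle classes _
  unfold Spec_get_bundle_vector
  exact ports_agree bundle classes
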